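-- pv_equiv track=rewrite | github.com/derRuedi/Advent-of-Code | 2024/day9/day9.py | find_dot_lengths
-- ===== SOURCE A (Python) =====
-- def find_dot_lengths(individual_blocks):
--     # find dots and their corresponding length in individual_blocks
--     dot_lengths = []
--     start = None
--     for i, value in enumerate(individual_blocks):
--         if value == '.':
--             if start is None:  # Start of a new sequence
--                 start = i
--         else:
--             if start is not None:  # End of the current sequence
--                 dot_lengths.append((start, i - start))
--                 start = None
--
--     # Handle the case where the list ends with '.'
--     if start is not None:
--         dot_lengths.append((start, len(individual_blocks) - start))
--     return dot_lengths
-- ===== SOURCE B (Python) =====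
-- def find_dot_lengths(individual_blocks):
--     # Run-based scan: jump over each maximal run of equal values at once,
--     # recording (start, length) for the runs of '.'.
--     n = len(individual_blocks)
--     result = []
--     i = 0
--     while i < n:
--         head = individual_blocks[i]
--         j = i + 1
--         while j < n and individual_blocks[j] == head:
--             j += 1
--         if head == '.':
--             result.append((i, j - i))
--         i = j
--     return result
-- ===== Notes on version B (the rewrite author's own statement) =====
-- stated objective: alternative
-- what changed: Replaces A's element-by-element state machine (Optional start sentinel plus a trailing-dot special case) by a run-jumping two-index scan that consumes each maximal run of equal values at once, with no sentinel and no post-loop fixup.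
import Mathlib
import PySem

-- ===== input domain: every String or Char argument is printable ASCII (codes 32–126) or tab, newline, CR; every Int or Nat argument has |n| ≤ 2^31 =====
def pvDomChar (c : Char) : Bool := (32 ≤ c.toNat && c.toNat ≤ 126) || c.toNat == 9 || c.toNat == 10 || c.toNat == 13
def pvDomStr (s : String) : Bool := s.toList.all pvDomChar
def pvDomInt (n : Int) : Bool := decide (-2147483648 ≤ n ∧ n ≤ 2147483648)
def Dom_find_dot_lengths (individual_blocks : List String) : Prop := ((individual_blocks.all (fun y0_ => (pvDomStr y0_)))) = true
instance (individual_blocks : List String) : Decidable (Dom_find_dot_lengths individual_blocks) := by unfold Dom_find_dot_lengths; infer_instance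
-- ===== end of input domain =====

-- B replaces A's element-by-element Optional-start state machine (with trailing-dot fixup)
-- by a run-jumping two-index scan; same O(n) cost, no sentinel, no post-loop special case.

-- ===== PORT A =====
-- the for-loop over enumerate(individual_blocks) with state (dot_lengths, start)
def fdlA : List String → Nat → List (Int × Int) → Option Int → List (Int × Int) × Option Int
  | [], _, acc, start => (acc, start)
  | v :: rest, i, acc, start =>
    if v == "." then
      match start with
      | none => fdlA rest (i + 1) acc (some (i : Int))
      | some _ => fdlA rest (i + 1) acc start
    else
      match start with
      | some s => fdlA rest (i + 1) (acc ++ [(s, (i : Int) - s)]) none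
      | none => fdlA rest (i + 1) acc none

def find_dot_lengths (individual_blocks : List String) : List (Int × Int) :=
  let st := fdlA individual_blocks 0 [] none
  match st.2 with
  | some s => st.1 ++ [(s, (individual_blocks.length : Int) - s)]
  | none => st.1

-- ===== PORT B =====
-- inner while loop: advance j past the run of values equal to head
def fdlInner (bs : List String) (head : String) (j : Nat) : Nat :=
  if j < bs.length ∧ bs.getD j "" == head then fdlInner bs head (j + 1) else j
termination_by bs.length - j
decreasing_by omega

theorem fdlInner_ge (bs : List String) (head : String) (j : Nat) :
    j ≤ fdlInner bs head j := by
  unfold fdlInner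
  split
  · have := fdlInner_ge bs head (j + 1); omega
  · omega
termination_by bs.length - j
decreasing_by omega

-- outer while loop, accumulating result
def fdlOuter (bs : List String) (i : Nat) (acc : List (Int × Int)) : List (Int × Int) :=
  if _h : i < bs.length then
    let head := bs.getD i ""
    let j := fdlInner bs head (i + 1)
    fdlOuter bs j (if head == "." then acc ++ [((i : Int), (j : Int) - (i : Int))] else acc)
  else acc
termination_by bs.length - i
decreasing_by have := fdlInner_ge bs (bs.getD i "") (i + 1); omega

def find_dot_lengths_alt (individual_blocks : List String) : List (Int × Int) :=
  fdlOuter individual_blocks 0 []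

-- ===== PRECONDITION & SPEC =====
def Spec_find_dot_lengths (individual_blocks : List String) (out : List (Int × Int)) : Prop := out = find_dot_lengths_alt individual_blocks
instance (individual_blocks : List String) (out : List (Int × Int)) : Decidable (Spec_find_dot_lengths individual_blocks out) := by unfold Spec_find_dot_lengths; infer_instance

-- ===== CLAIM (what is proved, stated in full; the proofs are below) =====
def Claim_equal_find_dot_lengths : Prop := ∀ (individual_blocks : List String), Dom_find_dot_lengths individual_blocks → Spec_find_dot_lengths individual_blocks (find_dot_lengths individual_blocks)

-- ===== LEMMAS AND PROOFS =====

-- A's loop from index i on the suffix bs.drop i, followed by the trailing fixup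
def Afin (bs : List String) (i : Nat) (acc : List (Int × Int)) (st : Option Int) : List (Int × Int) :=
  match fdlA (bs.drop i) i acc st with
  | (a, some s) => a ++ [(s, (bs.length : Int) - s)]
  | (a, none) => a

theorem fdlInner_le (bs : List String) (head : String) (j : Nat) (_h : j ≤ bs.length) :
    fdlInner bs head j ≤ bs.length := by
  unfold fdlInner
  split
  · exact fdlInner_le bs head (j + 1) (by rename_i hc; omega)
  · omega
termination_by bs.length - j
decreasing_by omega

theorem fdlInner_stop (bs : List String) (head : String) (j : Nat) :
    ¬ (fdlInner bs head j < bs.length ∧ bs.getD (fdlInner bs head j) "" = head) := by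
  unfold fdlInner
  split
  · exact fdlInner_stop bs head (j + 1)
  · rename_i hc
    simp only [beq_iff_eq] at hc
    exact hc
termination_by bs.length - j
decreasing_by omega

theorem fdlInner_step (bs : List String) (head : String) (j : Nat) :
    fdlInner bs head j =
      if j < bs.length ∧ bs.getD j "" = head then fdlInner bs head (j + 1) else j := by
  rw [fdlInner]
  simp only [beq_iff_eq]

theorem fdlOuter_step (bs : List String) (i : Nat) (acc : List (Int × Int))
    (h : i < bs.length) :
    fdlOuter bs i acc =
      fdlOuter bs (fdlInner bs (bs.getD i "") (i + 1))
        (if bs.getD i "" = "." then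
          acc ++ [((i : Int), ((fdlInner bs (bs.getD i "") (i + 1) : Nat) : Int) - (i : Int))]
        else acc) := by
  rw [fdlOuter]
  simp only [dif_pos h, beq_iff_eq]

theorem fdlOuter_end (bs : List String) (i : Nat) (acc : List (Int × Int))
    (h : ¬ i < bs.length) :
    fdlOuter bs i acc = acc := by
  rw [fdlOuter]
  simp only [dif_neg h]

theorem drop_cons (bs : List String) (i : Nat) (h : i < bs.length) :
    bs.drop i = bs.getD i "" :: bs.drop (i + 1) := by
  rw [List.drop_eq_getElem_cons h]
  simp [List.getD, List.getElem?_eq_getElem h]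

-- one step of A's loop
theorem Afin_step (bs : List String) (i : Nat) (acc : List (Int × Int)) (st : Option Int)
    (h : i < bs.length) :
    Afin bs i acc st =
      (if bs.getD i "" = "." then
        match st with
        | none => Afin bs (i + 1) acc (some (i : Int))
        | some _ => Afin bs (i + 1) acc st
      else
        match st with
        | some s => Afin bs (i + 1) (acc ++ [(s, (i : Int) - s)]) none
        | none => Afin bs (i + 1) acc none) := by
  unfold Afin
  rw [drop_cons bs i h]
  by_cases hd : bs.getD i "" = "." <;> cases st <;>
    simp only [List.getD] at hd <;> simp [fdlA, hd]

theorem Afin_end (bs : List String) (i : Nat) (acc : List (Int × Int))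
    (h : ¬ i < bs.length) :
    Afin bs i acc none = acc ∧ ∀ s, Afin bs i acc (some s) = acc ++ [(s, (bs.length : Int) - s)] := by
  unfold Afin
  rw [List.drop_eq_nil_of_le (by omega)]
  exact ⟨rfl, fun s => rfl⟩

-- L1: a step onto a non-dot element leaves B's result unchanged
theorem fdlOuter_skip (bs : List String) (i : Nat) (acc : List (Int × Int))
    (h : i < bs.length) (hd : bs.getD i "" ≠ ".") :
    fdlOuter bs i acc = fdlOuter bs (i + 1) acc := by
  rw [fdlOuter_step bs i acc h, if_neg hd]
  rw [fdlInner_step bs (bs.getD i "") (i + 1)]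
  by_cases hc : (i + 1 < bs.length ∧ bs.getD (i + 1) "" = bs.getD i "")
  · rw [if_pos hc, fdlOuter_step bs (i + 1) acc hc.1, hc.2, if_neg hd]
  · rw [if_neg hc]

-- L2: A's loop in the "start = some s" state, over the run of dots from i
theorem Afin_dots (bs : List String) (i : Nat) (acc : List (Int × Int)) (s : Int)
    (_h : i ≤ bs.length) :
    Afin bs i acc (some s) =
      (if fdlInner bs "." i < bs.length then
        Afin bs (fdlInner bs "." i + 1) (acc ++ [(s, ((fdlInner bs "." i : Nat) : Int) - s)]) none
       else acc ++ [(s, (bs.length : Int) - s)]) := by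
  by_cases hi : i < bs.length
  · rw [Afin_step bs i acc (some s) hi]
    by_cases hd : bs.getD i "" = "."
    · rw [if_pos hd]
      rw [Afin_dots bs (i + 1) acc s (by omega)]
      have hj : fdlInner bs "." i = fdlInner bs "." (i + 1) := by
        rw [fdlInner_step bs "." i, if_pos ⟨hi, hd⟩]
      rw [hj]
    · rw [if_neg hd]
      have hj : fdlInner bs "." i = i := by
        rw [fdlInner_step bs "." i, if_neg]
        intro hc
        exact hd hc.2
      rw [hj, if_pos hi]
  · have hj : fdlInner bs "." i = i := by
      rw [fdlInner_step bs "." i, if_neg]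
      intro hc
      exact hi hc.1
    rw [hj, if_neg hi]
    exact ((Afin_end bs i acc hi).2 s)
termination_by bs.length - i
decreasing_by omega

-- L3: the main invariant, A's loop in the "start = none" state equals B's run scan
theorem Afin_eq_outer (bs : List String) (i : Nat) (acc : List (Int × Int))
    (_h : i ≤ bs.length) :
    Afin bs i acc none = fdlOuter bs i acc := by
  by_cases hi : i < bs.length
  · rw [Afin_step bs i acc none hi]
    by_cases hd : bs.getD i "" = "."
    · rw [if_pos hd]
      rw [Afin_dots bs (i + 1) acc (i : Int) (by omega)]
      have hge := fdlInner_ge bs "." (i + 1)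
      have hle := fdlInner_le bs "." (i + 1) (by omega)
      rw [fdlOuter_step bs i acc hi, if_pos hd, hd]
      by_cases hjn : fdlInner bs "." (i + 1) < bs.length
      · rw [if_pos hjn]
        have hstop := fdlInner_stop bs "." (i + 1)
        have hjd : bs.getD (fdlInner bs "." (i + 1)) "" ≠ "." := fun hc => hstop ⟨hjn, hc⟩
        rw [Afin_eq_outer bs (fdlInner bs "." (i + 1) + 1) _ (by omega)]
        exact (fdlOuter_skip bs (fdlInner bs "." (i + 1)) _ hjn hjd).symm
      · rw [if_neg hjn]
        rw [fdlOuter_end bs (fdlInner bs "." (i + 1)) _ hjn]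
        have : fdlInner bs "." (i + 1) = bs.length := by omega
        rw [this]
    · rw [if_neg hd]
      rw [Afin_eq_outer bs (i + 1) acc (by omega)]
      exact (fdlOuter_skip bs i acc hi hd).symm
  · rw [(Afin_end bs i acc hi).1, fdlOuter_end bs i acc hi]
termination_by bs.length - i
decreasing_by all_goals omega

-- ===== VERDICT (by name: the statement is the Claim_ definition above) =====
theorem find_dot_lengths_spec : Claim_equal_find_dot_lengths := by
  intro bs _
  unfold Spec_find_dot_lengths find_dot_lengths find_dot_lengths_alt
  have := Afin_eq_outer bs 0 [] (by omega)
  unfold Afin at this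
  simp only [List.drop_zero] at this
  rw [← this]
  cases hst : fdlA bs 0 [] none with
  | mk a st => cases st <;> simp
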